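-- pv_equiv track=rewrite | github.com/volcengine/verl | atropos/environments/intern_bootcamp/internbootcamp_lib/internbootcamp/bootcamp/cfractaldetector/cfractaldetector.py | generate_fractal
-- ===== SOURCE A (Python) =====
-- def generate_fractal(mask, steps):
--     size = 2 ** (steps + 1)
--     grid = [['.' for _ in range(size)] for _ in range(size)]
--     kx = [0, 0, 1, 1]
--     ky = [0, 1, 0, 1]
--
--     def fill(x, y, block_size, current_step, is_black):
--         if current_step > steps:
--             for i in range(x, x + block_size):
--                 for j in range(y, y + block_size):
--                     grid[i][j] = '*' if is_black else '.'
--             return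
--
--         new_size = block_size // 2
--         for q in range(4):
--             dx = kx[q] * new_size
--             dy = ky[q] * new_size
--             nx = x + dx
--             ny = y + dy
--             if is_black:
--                 fill(nx, ny, new_size, current_step + 1, True)
--             else:
--                 bit = (mask >> (3 - q)) & 1
--                 sub_black = bit == 1
--                 fill(nx, ny, new_size, current_step + 1, sub_black)
--
--     fill(0, 0, size, 0, False)
--     return grid
-- ===== SOURCE B (Python) =====
-- def generate_fractal(mask, steps):
--     size = 2 ** (steps + 1)
--     grid = []
--     for i in range(size):
--         row = []
--         for j in range(size):
--             c = '.'
--             for s in range(steps + 1):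
--                 q = 2 * ((i >> s) & 1) + ((j >> s) & 1)
--                 if (mask >> (3 - q)) & 1:
--                     c = '*'
--                     break
--             row.append(c)
--         grid.append(row)
--     return grid
-- ===== Notes on version B (the rewrite author's own statement) =====
-- stated objective: simpler
-- what changed: Replaces the recursive quadrant-subdivision block fill (mutating a preallocated grid) with a direct per-cell construction: each cell's colour is computed independently by scanning its coordinate bits from low to high and testing the corresponding quadrant bit of the mask.
import Mathlib
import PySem

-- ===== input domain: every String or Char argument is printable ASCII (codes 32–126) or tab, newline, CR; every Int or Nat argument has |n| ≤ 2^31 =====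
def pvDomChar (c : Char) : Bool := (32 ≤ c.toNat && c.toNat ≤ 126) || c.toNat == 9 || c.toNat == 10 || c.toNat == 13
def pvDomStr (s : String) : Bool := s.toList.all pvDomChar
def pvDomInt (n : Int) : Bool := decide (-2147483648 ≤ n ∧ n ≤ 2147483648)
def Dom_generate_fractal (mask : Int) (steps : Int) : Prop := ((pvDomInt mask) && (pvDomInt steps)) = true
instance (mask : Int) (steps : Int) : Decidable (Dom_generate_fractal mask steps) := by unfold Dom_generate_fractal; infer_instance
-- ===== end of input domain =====

-- B replaces A's recursive quadrant-subdivision fill of a mutable grid by a direct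
-- per-cell construction (each cell's colour computed from its coordinate bits);
-- objective: simpler. A mutates only its local grid, so return-value equivalence is full equivalence.

-- ===== PORT A =====
-- Python `m >> k` on int is floor-division by 2^k and `& 1` is mod 2 (exact, incl. negative m)
def pvBit (mask : Int) (sh : Nat) : Int :=
  PySem.Int.mod (PySem.Int.floordiv mask ((2 : Int) ^ sh)) 2

def pvKx : List Nat := [0, 0, 1, 1]
def pvKy : List Nat := [0, 1, 0, 1]

-- `grid[i][j] = c` (in-place assignment, ported as a functional update)
def pvSetCell (g : List (List String)) (i j : Nat) (c : String) : List (List String) :=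
  g.modify i (fun row => row.set j c)

-- the double for-loop of `fill` in the `current_step > steps` branch
def pvFillRect (g : List (List String)) (x y bs : Nat) (c : String) : List (List String) :=
  (List.range bs).foldl
    (fun g i => (List.range bs).foldl (fun g j => pvSetCell g (x + i) (y + j) c) g) g

-- `fill(x, y, block_size, current_step, is_black)`; the counter `current_step` (which only
-- ever appears in `current_step > steps` and `current_step + 1`) is ported as the remaining
-- depth `fuel = steps + 1 - current_step`, the obvious structural recursion.
def pvFill (mask : Int) (g : List (List String)) (x y bs : Nat) (fuel : Nat) (isBlack : Bool) :
    List (List String) :=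
  match fuel with
  | 0 => pvFillRect g x y bs (if isBlack then "*" else ".")
  | f + 1 =>
    let ns := bs / 2
    (List.range 4).foldl (fun g q =>
      let nx := x + pvKx.getD q 0 * ns
      let ny := y + pvKy.getD q 0 * ns
      if isBlack then pvFill mask g nx ny ns f true
      else pvFill mask g nx ny ns f (pvBit mask (3 - q) == 1)) g

def generate_fractal (mask : Int) (steps : Int) : List (List String) :=
  let size := 2 ^ (steps + 1).toNat
  let grid := (List.range size).map (fun _ => (List.range size).map (fun _ => "."))
  pvFill mask grid 0 0 size (steps + 1).toNat false

-- ===== PORT B =====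
def generate_fractal_alt (mask : Int) (steps : Int) : List (List String) :=
  let size := 2 ^ (steps + 1).toNat
  (List.range size).map (fun i =>
    (List.range size).map (fun j =>
      if (List.range (steps + 1).toNat).any (fun s =>
          pvBit mask (3 - (2 * ((i >>> s) &&& 1) + ((j >>> s) &&& 1))) == 1)
      then "*" else "."))

-- ===== PRECONDITION & SPEC =====
-- A raises TypeError when steps ≤ -2 (2 ** (steps+1) is then a float and range() rejects it)
def Pre_generate_fractal (mask : Int) (steps : Int) : Prop := -1 ≤ steps
instance (mask : Int) (steps : Int) : Decidable (Pre_generate_fractal mask steps) := by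
  unfold Pre_generate_fractal; infer_instance
def pvWitness_generate_fractal : Int × Int := (6, 1)

def Spec_generate_fractal (mask : Int) (steps : Int) (out : List (List String)) : Prop :=
  out = generate_fractal_alt mask steps
instance (mask : Int) (steps : Int) (out : List (List String)) :
    Decidable (Spec_generate_fractal mask steps out) := by
  unfold Spec_generate_fractal; infer_instance

-- ===== CLAIM (what is proved, stated in full; the proofs are below) =====
def Claim_equal_generate_fractal : Prop := ∀ (mask : Int) (steps : Int),
  Dom_generate_fractal mask steps → Pre_generate_fractal mask steps →
  Spec_generate_fractal mask steps (generate_fractal mask steps)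

-- ===== LEMMAS AND PROOFS =====

-- cell accessor and grid-shape predicate
def pvCell (g : List (List String)) (i j : Nat) : Option String :=
  g[i]?.bind (fun r => r[j]?)

def pvShape (g : List (List String)) (N : Nat) : Prop :=
  g.length = N ∧ ∀ (i : Nat) (r : List String), g[i]? = some r → r.length = N

-- the colour `fill` gives a cell, stated as a recursion mirroring the quadrant descent
def pvSpecRec (mask : Int) : Nat → Bool → Nat → Nat → String
  | 0, b, _, _ => if b then "*" else "."
  | f + 1, b, u, v =>
    let n := 2 ^ f
    pvSpecRec mask f (b || (pvBit mask (3 - (2 * (u / n) + v / n)) == 1)) (u % n) (v % n)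

-- the condition B tests for a cell
def pvSpecB (mask : Int) (f : Nat) (u v : Nat) : Bool :=
  (List.range f).any (fun s =>
    pvBit mask (3 - (2 * ((u >>> s) &&& 1) + ((v >>> s) &&& 1))) == 1)

lemma pvShape_setCell {g : List (List String)} {N : Nat} (h : pvShape g N)
    (i j : Nat) (c : String) : pvShape (pvSetCell g i j c) N := by
  obtain ⟨hl, hr⟩ := h
  refine ⟨by simpa [pvSetCell] using hl, ?_⟩
  intro i' r hr'
  rw [pvSetCell, List.getElem?_modify] at hr'
  cases h' : g[i']? with
  | none => rw [h'] at hr'; simp at hr'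
  | some r0 =>
    rw [h'] at hr'
    have hlen := hr i' r0 h'
    simp at hr'
    subst hr'
    split
    · simpa using hlen
    · exact hlen

lemma pvCell_setCell {g : List (List String)} {N : Nat} (h : pvShape g N)
    {i j : Nat} (hi : i < N) (hj : j < N) (c : String) (i' j' : Nat) :
    pvCell (pvSetCell g i j c) i' j' =
      if i = i' ∧ j = j' then some c else pvCell g i' j' := by
  obtain ⟨hl, hr⟩ := h
  unfold pvCell pvSetCell
  rw [List.getElem?_modify]
  by_cases hii : i = i'
  · subst hii
    have hgi : ∃ r, g[i]? = some r := by
      have : i < g.length := by omega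
      exact ⟨g[i], List.getElem?_eq_getElem this⟩
    obtain ⟨r, hrr⟩ := hgi
    have hrl : r.length = N := hr i r hrr
    by_cases hjj : j = j'
    · subst hjj; simp [hrr, List.getElem?_set, hrl, hj]
    · simp [hrr, List.getElem?_set, hjj]
  · simp only [hii, false_and, if_false]
    cases g[i']? <;> simp [hii]

lemma pvSpecRec_quad (mask : Int) (f : Nat) (b : Bool) (u v a c : Nat)
    (ha : a < 2) (hc : c < 2) (hu : u < 2 ^ f) (hv : v < 2 ^ f) :
    pvSpecRec mask (f + 1) b (a * 2 ^ f + u) (c * 2 ^ f + v)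
      = pvSpecRec mask f (b || (pvBit mask (3 - (2 * a + c)) == 1)) u v := by
  have hn : 0 < 2 ^ f := Nat.two_pow_pos f
  have hdu : (a * 2 ^ f + u) / 2 ^ f = a := by
    rw [Nat.add_comm, Nat.mul_comm, Nat.add_mul_div_left _ _ hn, Nat.div_eq_of_lt hu, Nat.zero_add]
  have hdv : (c * 2 ^ f + v) / 2 ^ f = c := by
    rw [Nat.add_comm, Nat.mul_comm, Nat.add_mul_div_left _ _ hn, Nat.div_eq_of_lt hv, Nat.zero_add]
  have hmu : (a * 2 ^ f + u) % 2 ^ f = u := by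
    rw [Nat.add_comm, Nat.add_mul_mod_self_right, Nat.mod_eq_of_lt hu]
  have hmv : (c * 2 ^ f + v) % 2 ^ f = v := by
    rw [Nat.add_comm, Nat.add_mul_mod_self_right, Nat.mod_eq_of_lt hv]
  rw [pvSpecRec]
  simp only [hdu, hdv, hmu, hmv]

-- main invariant: fill on a 2^f block writes pvSpecRec into the block and nothing else
lemma pvFill_spec (mask : Int) (N : Nat) : ∀ (f x y : Nat) (b : Bool) (g : List (List String)),
    pvShape g N → x + 2 ^ f ≤ N → y + 2 ^ f ≤ N →
    pvShape (pvFill mask g x y (2 ^ f) f b) N ∧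
    ∀ i j, pvCell (pvFill mask g x y (2 ^ f) f b) i j =
      if x ≤ i ∧ i < x + 2 ^ f ∧ y ≤ j ∧ j < y + 2 ^ f
      then some (pvSpecRec mask f b (i - x) (j - y)) else pvCell g i j := by
  intro f
  induction f with
  | zero =>
    intro x y b g hs hx hy
    rw [pow_zero] at hx hy ⊢
    have he : pvFill mask g x y 1 0 b = pvSetCell g x y (if b then "*" else ".") := by
      simp [pvFill, pvFillRect, List.range_succ]
    rw [he]
    refine ⟨pvShape_setCell hs x y _, ?_⟩
    intro i j
    rw [pvCell_setCell hs (by omega) (by omega)]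
    by_cases h1 : x = i ∧ y = j
    · obtain ⟨rfl, rfl⟩ := h1
      simp [pvSpecRec]
    · rw [if_neg h1, if_neg (by omega)]
  | succ f ih =>
    intro x y b g hs hx hy
    have hn : 0 < 2 ^ f := Nat.two_pow_pos f
    have hpow : (2 : Nat) ^ (f + 1) = 2 ^ f * 2 := pow_succ 2 f
    have hns : (2 : Nat) ^ (f + 1) / 2 = 2 ^ f := by omega
    have he : pvFill mask g x y (2 ^ (f + 1)) (f + 1) b =
        pvFill mask (pvFill mask (pvFill mask (pvFill mask g
          x y (2 ^ f) f (b || (pvBit mask 3 == 1)))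
          x (y + 2 ^ f) (2 ^ f) f (b || (pvBit mask 2 == 1)))
          (x + 2 ^ f) y (2 ^ f) f (b || (pvBit mask 1 == 1)))
          (x + 2 ^ f) (y + 2 ^ f) (2 ^ f) f (b || (pvBit mask 0 == 1)) := by
      cases b <;>
        simp [pvFill, hns, show List.range 4 = [0, 1, 2, 3] from rfl,
          pvKx, pvKy]
    obtain ⟨hs1, hc1⟩ := ih x y (b || (pvBit mask 3 == 1)) g hs (by omega) (by omega)
    obtain ⟨hs2, hc2⟩ := ih x (y + 2 ^ f) (b || (pvBit mask 2 == 1)) _ hs1 (by omega) (by omega)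
    obtain ⟨hs3, hc3⟩ := ih (x + 2 ^ f) y (b || (pvBit mask 1 == 1)) _ hs2 (by omega) (by omega)
    obtain ⟨hs4, hc4⟩ := ih (x + 2 ^ f) (y + 2 ^ f) (b || (pvBit mask 0 == 1)) _ hs3 (by omega) (by omega)
    rw [he]
    refine ⟨hs4, ?_⟩
    intro i j
    rw [hc4, hc3, hc2, hc1]
    by_cases hB : x ≤ i ∧ i < x + 2 ^ (f + 1) ∧ y ≤ j ∧ j < y + 2 ^ (f + 1)
    · rw [if_pos hB]
      by_cases hi2 : i < x + 2 ^ f <;> by_cases hj2 : j < y + 2 ^ f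
      · -- quadrant q = 0
        rw [if_neg (by omega), if_neg (by omega), if_neg (by omega), if_pos (by omega)]
        have hquad := pvSpecRec_quad mask f b (i - x) (j - y) 0 0
          (by omega) (by omega) (by omega) (by omega)
        rw [show 0 * 2 ^ f + (i - x) = i - x from by omega,
            show 0 * 2 ^ f + (j - y) = j - y from by omega] at hquad
        rw [hquad]
      · -- quadrant q = 1
        rw [if_neg (by omega), if_neg (by omega), if_pos (by omega)]
        have hquad := pvSpecRec_quad mask f b (i - x) (j - (y + 2 ^ f)) 0 1
          (by omega) (by omega) (by omega) (by omega)
        rw [show 0 * 2 ^ f + (i - x) = i - x from by omega,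
            show 1 * 2 ^ f + (j - (y + 2 ^ f)) = j - y from by omega] at hquad
        rw [hquad]
      · -- quadrant q = 2
        rw [if_neg (by omega), if_pos (by omega)]
        have hquad := pvSpecRec_quad mask f b (i - (x + 2 ^ f)) (j - y) 1 0
          (by omega) (by omega) (by omega) (by omega)
        rw [show 1 * 2 ^ f + (i - (x + 2 ^ f)) = i - x from by omega,
            show 0 * 2 ^ f + (j - y) = j - y from by omega] at hquad
        rw [hquad]
      · -- quadrant q = 3
        rw [if_pos (by omega)]
        have hquad := pvSpecRec_quad mask f b (i - (x + 2 ^ f)) (j - (y + 2 ^ f)) 1 1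
          (by omega) (by omega) (by omega) (by omega)
        rw [show 1 * 2 ^ f + (i - (x + 2 ^ f)) = i - x from by omega,
            show 1 * 2 ^ f + (j - (y + 2 ^ f)) = j - y from by omega] at hquad
        rw [hquad]
    · rw [if_neg hB, if_neg (by omega), if_neg (by omega), if_neg (by omega),
          if_neg (by omega)]

-- B's test is stable under taking the coordinates mod 2^f
lemma pvBit_mod_pow {u s f : Nat} (hs : s < f) : ((u % 2 ^ f) >>> s) &&& 1 = (u >>> s) &&& 1 := by
  have h1 : (2 : Nat) ^ f = 2 ^ s * 2 ^ (f - s) := by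
    rw [← pow_add]; congr 1; omega
  have h2 : u % (2 ^ s * 2 ^ (f - s)) / 2 ^ s = u / 2 ^ s % 2 ^ (f - s) :=
    Nat.mod_mul_right_div_self u (2 ^ s) (2 ^ (f - s))
  have h3 : (2 : Nat) ∣ 2 ^ (f - s) := dvd_pow_self 2 (by omega)
  simp only [Nat.shiftRight_eq_div_pow, Nat.and_one_is_mod]
  rw [h1, h2, Nat.mod_mod_of_dvd _ h3]

lemma pvSpecB_mod (mask : Int) (f : Nat) (u v : Nat) :
    pvSpecB mask f (u % 2 ^ f) (v % 2 ^ f) = pvSpecB mask f u v := by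
  unfold pvSpecB
  rw [Bool.eq_iff_iff]
  simp only [List.any_eq_true, List.mem_range]
  constructor <;> rintro ⟨s, hs, h⟩ <;> refine ⟨s, hs, ?_⟩ <;>
    rw [pvBit_mod_pow hs, pvBit_mod_pow hs] at * <;> assumption

-- the recursion computes exactly B's per-cell test
lemma pvSpecRec_eq (mask : Int) : ∀ (f : Nat) (b : Bool) (u v : Nat), u < 2 ^ f → v < 2 ^ f →
    pvSpecRec mask f b u v = if b || pvSpecB mask f u v then "*" else "." := by
  intro f
  induction f with
  | zero => intro b u v _ _; simp [pvSpecRec, pvSpecB]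
  | succ f ih =>
    intro b u v hu hv
    have hn : (0 : Nat) < 2 ^ f := Nat.two_pow_pos f
    have hpow : (2 : Nat) ^ (f + 1) = 2 ^ f * 2 := pow_succ 2 f
    have hud : u / 2 ^ f < 2 := Nat.div_lt_of_lt_mul (by omega)
    have hvd : v / 2 ^ f < 2 := Nat.div_lt_of_lt_mul (by omega)
    have htu : (u >>> f) &&& 1 = u / 2 ^ f := by
      simp only [Nat.shiftRight_eq_div_pow, Nat.and_one_is_mod]
      exact Nat.mod_eq_of_lt hud
    have htv : (v >>> f) &&& 1 = v / 2 ^ f := by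
      simp only [Nat.shiftRight_eq_div_pow, Nat.and_one_is_mod]
      exact Nat.mod_eq_of_lt hvd
    rw [pvSpecRec, ih _ _ _ (Nat.mod_lt _ hn) (Nat.mod_lt _ hn), pvSpecB_mod]
    have hsb : pvSpecB mask (f + 1) u v =
        (pvSpecB mask f u v ||
          (pvBit mask (3 - (2 * (u / 2 ^ f) + v / 2 ^ f)) == 1)) := by
      unfold pvSpecB
      rw [List.range_succ, List.any_append]
      simp only [List.any_cons, List.any_nil, Bool.or_false]
      rw [htu, htv]
    rw [hsb]
    congr 1
    cases b <;> cases pvSpecB mask f u v <;>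
      cases h : (pvBit mask (3 - (2 * (u / 2 ^ f) + v / 2 ^ f)) == 1) <;> simp

-- grid extensionality through pvCell
lemma pvGrid_ext {g h : List (List String)}
    (hrow : ∀ (i : Nat), (g[i]?).map List.length = (h[i]?).map List.length)
    (hc : ∀ i j, pvCell g i j = pvCell h i j) : g = h := by
  apply List.ext_getElem?
  intro i
  cases hg : g[i]? with
  | none =>
    have := hrow i
    rw [hg] at this
    cases hh : h[i]? with
    | none => rfl
    | some r => rw [hh] at this; simp at this
  | some r =>
    have := hrow i
    rw [hg] at this
    cases hh : h[i]? with
    | none => rw [hh] at this; simp at this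
    | some r' =>
      rw [hh] at this
      simp only [Option.map_some, Option.some.injEq] at this
      have : r = r' := by
        apply List.ext_getElem?
        intro j
        have := hc i j
        unfold pvCell at this
        rw [hg, hh] at this
        simpa using this
      rw [this]

lemma pvShape_rowlen {g : List (List String)} {N : Nat} (h : pvShape g N) (i : Nat) :
    (g[i]?).map List.length = if i < N then some N else none := by
  obtain ⟨hl, hr⟩ := h
  by_cases hi : i < N
  · have hlt : i < g.length := by omega
    rw [List.getElem?_eq_getElem hlt]
    simp [hr i _ (List.getElem?_eq_getElem hlt), hi]
  · rw [List.getElem?_eq_none (by omega)]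
    simp [hi]

-- ===== VERDICT (by name: the statement is the Claim_ definition above) =====
theorem generate_fractal_spec : Claim_equal_generate_fractal := by
  intro mask steps _ _
  show pvFill mask
      ((List.range (2 ^ (steps + 1).toNat)).map
        (fun _ => (List.range (2 ^ (steps + 1).toNat)).map (fun _ => ".")))
      0 0 (2 ^ (steps + 1).toNat) (steps + 1).toNat false
    = (List.range (2 ^ (steps + 1).toNat)).map (fun i =>
        (List.range (2 ^ (steps + 1).toNat)).map (fun j =>
          if (List.range (steps + 1).toNat).any (fun s =>
              pvBit mask (3 - (2 * ((i >>> s) &&& 1) + ((j >>> s) &&& 1))) == 1)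
          then "*" else "."))
  set F := (steps + 1).toNat with hF
  have hshape0 : pvShape
      ((List.range (2 ^ F)).map (fun _ => (List.range (2 ^ F)).map (fun _ => "."))) (2 ^ F) := by
    constructor
    · simp
    · intro i r h
      rw [List.getElem?_map] at h
      cases h' : (List.range (2 ^ F))[i]? with
      | none => rw [h'] at h; simp at h
      | some k =>
        rw [h'] at h
        simp only [Option.map_some, Option.some.injEq] at h
        rw [← h]
        simp
  obtain ⟨hsF, hcF⟩ := pvFill_spec mask (2 ^ F) F 0 0 false _ hshape0 (by omega) (by omega)
  apply pvGrid_ext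
  · intro i
    rw [pvShape_rowlen hsF i]
    by_cases hi : i < 2 ^ F <;> simp [List.getElem?_map, List.getElem?_range, hi]
  · intro i j
    rw [hcF i j]
    by_cases hij : i < 2 ^ F ∧ j < 2 ^ F
    · rw [if_pos (by omega)]
      have hR : pvCell ((List.range (2 ^ F)).map (fun i =>
          (List.range (2 ^ F)).map (fun j =>
            if (List.range F).any (fun s =>
                pvBit mask (3 - (2 * ((i >>> s) &&& 1) + ((j >>> s) &&& 1))) == 1)
            then "*" else "."))) i j
          = some (if pvSpecB mask F i j then "*" else ".") := by
        simp [pvCell, pvSpecB, List.getElem?_map, List.getElem?_range, hij.1, hij.2]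
      rw [hR]
      rw [show i - 0 = i from rfl, show j - 0 = j from rfl]
      rw [pvSpecRec_eq mask F false i j hij.1 hij.2]
      simp
    · rw [if_neg (by omega)]
      have hL : pvCell ((List.range (2 ^ F)).map
          (fun _ => (List.range (2 ^ F)).map (fun _ => ("." : String)))) i j = none := by
        by_cases hi : i < 2 ^ F
        · have hj : ¬ j < 2 ^ F := by tauto
          simp [pvCell, List.getElem?_map, List.getElem?_range, hi, hj]
        · simp [pvCell, List.getElem?_map, List.getElem?_range, hi]
      have hR : pvCell ((List.range (2 ^ F)).map (fun i =>
          (List.range (2 ^ F)).map (fun j =>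
            if (List.range F).any (fun s =>
                pvBit mask (3 - (2 * ((i >>> s) &&& 1) + ((j >>> s) &&& 1))) == 1)
            then "*" else "."))) i j = none := by
        by_cases hi : i < 2 ^ F
        · have hj : ¬ j < 2 ^ F := by tauto
          simp [pvCell, List.getElem?_map, List.getElem?_range, hi, hj]
        · simp [pvCell, List.getElem?_map, List.getElem?_range, hi]
      rw [hL, hR]
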